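-- pv_equiv track=rewrite | github.com/Horse64/core.horse64.org | translator/translator_modules/translator_runtime_helpers_templating.py | get_identifier_len
-- ===== SOURCE A (Python) =====
-- def get_identifier_len(s, pos):
--     len_s = len(s)
--     i = pos
--     while i < len_s:
--         c = s[i]
--         if ((i == pos or ((ord(c) < ord('0') or ord(c) > ord('9')))) and
--                (ord(c) < ord('A') or ord(c) > ord('Z')) and
--                (ord(c) < ord('a') or ord(c) > ord('z')) and
--                c != "_" and
--                ord(c) <= 127):
--             break
--         i += 1
--     return i - pos
-- ===== SOURCE B (Python) =====
-- import re
--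
-- # identifier = one start char (letter, '_', or any non-ASCII char) followed by
-- # any number of continuation chars (the same plus digits), matched at the head
-- # of the tail s[pos:]
-- _IDENT = re.compile(r"(?:[A-Za-z_]|[^\x00-\x7f])(?:[A-Za-z0-9_]|[^\x00-\x7f])*")
--
-- def get_identifier_len(s, pos):
--     m = _IDENT.match(s[pos:])
--     return len(m.group()) if m else 0
-- ===== Notes on version B (the rewrite author's own statement) =====
-- stated objective: idiomatic
-- what changed: B replaces A's hand-written char-by-char while loop (with its i == pos special case and raw s[i] indexing) by a single precompiled regular expression matched against the tail s[pos:], whose first character class [A-Za-z_]|[^\x00-\x7f] and continuation class [A-Za-z0-9_]|[^\x00-\x7f] encode the leading-digit exclusion and the non-ASCII quirk; the answer is the length of the match, or 0; the regex engine's C-level scan gives a constant-factor speedup over A's per-char Python loop.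
-- intended difference: On in-range negative pos whose suffix s[len+pos:] is entirely one identifier and whose first character s[0] is an identifier-continuation character, A's negative-index wraparound scans past the end back into the front of the string and returns more than the suffix length, while B returns the identifier length of the suffix itself, which is the intended value. — e.g. on get_identifier_len("ab", -2): A returns 4, B returns 2
import Mathlib
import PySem

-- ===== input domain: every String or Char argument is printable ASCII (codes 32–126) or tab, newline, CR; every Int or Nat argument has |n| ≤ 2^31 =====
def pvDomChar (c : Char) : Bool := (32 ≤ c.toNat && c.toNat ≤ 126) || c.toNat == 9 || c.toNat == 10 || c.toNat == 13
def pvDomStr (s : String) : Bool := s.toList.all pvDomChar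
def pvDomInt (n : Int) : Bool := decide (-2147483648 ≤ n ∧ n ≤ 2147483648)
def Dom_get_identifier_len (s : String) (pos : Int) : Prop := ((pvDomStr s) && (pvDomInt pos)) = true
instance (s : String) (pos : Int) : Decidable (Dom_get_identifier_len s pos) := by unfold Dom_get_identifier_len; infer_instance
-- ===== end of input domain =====

-- B replaces A's hand-written index loop (with its i == pos special case and raw s[i]
-- negative-index wraparound) by one precompiled regular expression matched against the
-- head of the tail s[pos:]; objective: idiomatic, same cost.

-- ===== PORT A =====
-- A's while loop, as structural recursion on fuel (fuel = len(s) - pos suffices: the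
-- fuel-exhausted result i - pos coincides with the loop-guard-false result).
-- The `none` branch of pyGet? is where Python A raises IndexError (pos < -len(s)); those
-- inputs are excluded by Pre_get_identifier_len.
def pvALoop (l : List Char) (pos : Int) : Nat → Int → Int
  | 0, i => i - pos
  | fuel + 1, i =>
    if i < (l.length : Int) then
      match PySem.List.pyGet? l i with
      | none => i - pos
      | some c =>
        if (i = pos ∨ c.toNat < 48 ∨ 57 < c.toNat) ∧
           (c.toNat < 65 ∨ 90 < c.toNat) ∧ (c.toNat < 97 ∨ 122 < c.toNat) ∧
           c ≠ '_' ∧ c.toNat ≤ 127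
        then i - pos
        else pvALoop l pos fuel (i + 1)
    else i - pos

def get_identifier_len (s : String) (pos : Int) : Int :=
  pvALoop s.toList pos ((s.toList.length : Int) - pos).toNat pos

-- ===== PORT B =====
-- Source B matches the precompiled regex _IDENT = (?:[A-Za-z_]|[^\x00-\x7f])(?:[A-Za-z0-9_]|[^\x00-\x7f])*
-- against the head of the tail s[pos:] with _IDENT.match. Lean has no regex library, so the
-- anchored match is hand-ported, exact for this pattern: it succeeds iff the first char is in
-- the first class, and the star is greedy.
def pvReStart (c : Char) : Bool :=
  decide (65 ≤ c.toNat ∧ c.toNat ≤ 90) || decide (97 ≤ c.toNat ∧ c.toNat ≤ 122) ||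
  c == '_' || decide (127 < c.toNat)

def pvReCont (c : Char) : Bool :=
  decide (65 ≤ c.toNat ∧ c.toNat ≤ 90) || decide (97 ≤ c.toNat ∧ c.toNat ≤ 122) ||
  decide (48 ≤ c.toNat ∧ c.toNat ≤ 57) || c == '_' || decide (127 < c.toNat)

-- the greedy star (?:[A-Za-z0-9_]|[^\x00-\x7f])*
def pvReStar : List Char → Int
  | [] => 0
  | c :: r => if pvReCont c then 1 + pvReStar r else 0

-- _IDENT.match(tail): some (length of the match) or none
def pvReMatch? : List Char → Option Int
  | [] => none
  | c :: r => if pvReStart c then some (1 + pvReStar r) else none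

def get_identifier_len_alt (s : String) (pos : Int) : Int :=
  match pvReMatch? (PySem.List.slice s.toList (some pos) none) with
  | some n => n
  | none => 0

-- ===== PRECONDITION & SPEC =====
-- Pre_ excludes exactly the inputs where Python A raises IndexError: pos < -len(s).
def Pre_get_identifier_len (s : String) (pos : Int) : Prop :=
  -(s.toList.length : Int) ≤ pos

instance (s : String) (pos : Int) : Decidable (Pre_get_identifier_len s pos) := by
  unfold Pre_get_identifier_len; infer_instance

def pvWitness_get_identifier_len : String × Int := ("foo", 0)

-- char class for the change region D_ (its own predicate, so that D_ is a condition on the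
-- input alone and shares no code with either port)
def pvDCont (c : Char) : Bool := c.isAlphanum || c == '_' || decide ('\x7f' < c)

-- On in-range negative pos whose suffix s[len+pos:] is entirely one identifier while s[0] is an
-- identifier-continuation char, A's negative-index wraparound scans past the end of the string
-- back into its front and returns a length longer than the suffix; B returns the identifier
-- length of the suffix itself, which is the intended value.
def D_get_identifier_len (s : String) (pos : Int) : Prop :=
  let t := s.toList.drop (s.toList.length - (-pos).toNat)
  pos < 0 ∧ (t.all pvDCont && t.head?.all (!·.isDigit) && s.toList.head?.all pvDCont) = true

instance (s : String) (pos : Int) : Decidable (D_get_identifier_len s pos) := by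
  unfold D_get_identifier_len; infer_instance

def Spec_get_identifier_len (s : String) (pos : Int) (out : Int) : Prop :=
  ¬ D_get_identifier_len s pos → out = get_identifier_len_alt s pos

instance (s : String) (pos : Int) (out : Int) : Decidable (Spec_get_identifier_len s pos out) := by
  unfold Spec_get_identifier_len; infer_instance

def pvDiffWitness_get_identifier_len : String × Int := ("ab", -2)
def pvDiffWitnessOut_get_identifier_len : Int × Int := (4, 2)

-- ===== CLAIM (what is proved, stated in full; the proofs are below) =====
def Claim_unchanged_get_identifier_len : Prop := ∀ (s : String) (pos : Int), Dom_get_identifier_len s pos → Pre_get_identifier_len s pos → Spec_get_identifier_len s pos (get_identifier_len s pos)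
def Claim_changed_get_identifier_len : Prop := Dom_get_identifier_len (pvDiffWitness_get_identifier_len.1) (pvDiffWitness_get_identifier_len.2) ∧ Pre_get_identifier_len (pvDiffWitness_get_identifier_len.1) (pvDiffWitness_get_identifier_len.2) ∧ D_get_identifier_len (pvDiffWitness_get_identifier_len.1) (pvDiffWitness_get_identifier_len.2) ∧ get_identifier_len (pvDiffWitness_get_identifier_len.1) (pvDiffWitness_get_identifier_len.2) = pvDiffWitnessOut_get_identifier_len.1 ∧ get_identifier_len_alt (pvDiffWitness_get_identifier_len.1) (pvDiffWitness_get_identifier_len.2) = pvDiffWitnessOut_get_identifier_len.2 ∧ pvDiffWitnessOut_get_identifier_len.1 ≠ pvDiffWitnessOut_get_identifier_len.2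
def Claim_exact_get_identifier_len : Prop := ∀ (s : String) (pos : Int), Dom_get_identifier_len s pos → Pre_get_identifier_len s pos → D_get_identifier_len s pos → get_identifier_len s pos ≠ get_identifier_len_alt s pos
-- ===== LEMMAS AND PROOFS =====

lemma pv_break_first' (c : Char) :
    ((True ∨ c.toNat < 48 ∨ 57 < c.toNat) ∧
     (c.toNat < 65 ∨ 90 < c.toNat) ∧ (c.toNat < 97 ∨ 122 < c.toNat) ∧
     c ≠ '_' ∧ c.toNat ≤ 127) ↔ pvReStart c = false := by
  by_cases hc : c = '_'
  · subst hc; simp [pvReStart]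
  · simp [pvReStart, hc]; omega

lemma pv_break_rest (c : Char) (pos i : Int) (hne : i ≠ pos) :
    ((i = pos ∨ c.toNat < 48 ∨ 57 < c.toNat) ∧
     (c.toNat < 65 ∨ 90 < c.toNat) ∧ (c.toNat < 97 ∨ 122 < c.toNat) ∧
     c ≠ '_' ∧ c.toNat ≤ 127) ↔ pvReCont c = false := by
  by_cases hc : c = '_'
  · subst hc; simp [pvReCont, hne]
  · simp [pvReCont, hne, hc]; omega

lemma pvDCont_eq : pvDCont = pvReCont := by
  funext c
  simp only [pvDCont, pvReCont, Char.isAlphanum, Char.isAlpha, Char.isDigit, Char.isUpper,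
    Char.isLower, Char.lt_def, Char.toNat, UInt32.le_iff_toNat_le, UInt32.lt_iff_toNat_lt]
  have h1 : ('A').val.toNat = 65 := by decide
  have h2 : ('Z').val.toNat = 90 := by decide
  have h3 : ('a').val.toNat = 97 := by decide
  have h4 : ('z').val.toNat = 122 := by decide
  have h5 : ('0').val.toNat = 48 := by decide
  have h6 : ('9').val.toNat = 57 := by decide
  have h7 : ('\x7f').val.toNat = 127 := by decide
  rw [h1, h2, h3, h4, h5, h6, h7]
  by_cases h : c = '_'
  · subst h; decide
  · rw [Bool.eq_iff_iff]
    simp only [Bool.or_eq_true, Bool.and_eq_true, decide_eq_true_iff, beq_iff_eq, h, or_false]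

lemma pv_isDigit_eq (c : Char) : c.isDigit = decide (48 ≤ c.toNat ∧ c.toNat ≤ 57) := by
  simp only [Char.isDigit, Char.toNat, UInt32.le_iff_toNat_le]
  have h5 : ('0').val.toNat = 48 := by decide
  have h6 : ('9').val.toNat = 57 := by decide
  rw [h5, h6, Bool.eq_iff_iff]
  simp only [Bool.and_eq_true, decide_eq_true_iff]

lemma pv_cont_of_start (c : Char) (h : pvReStart c = true) : pvReCont c = true := by
  simp only [pvReStart, Bool.or_eq_true] at h
  simp only [pvReCont, Bool.or_eq_true]
  tauto

lemma pv_not_digit_of_start (c : Char) (h : pvReStart c = true) : c.isDigit = false := by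
  by_cases hc : c = '_'
  · subst hc; decide
  · simp only [pvReStart, Bool.or_eq_true, decide_eq_true_iff, beq_iff_eq, hc, or_false] at h
    rw [pv_isDigit_eq]
    simp only [decide_eq_false_iff_not]
    omega

lemma pv_start_of (c : Char) (h1 : pvReCont c = true) (h2 : c.isDigit = false) :
    pvReStart c = true := by
  by_cases hc : c = '_'
  · subst hc; decide
  · rw [pv_isDigit_eq] at h2
    simp only [decide_eq_false_iff_not] at h2
    simp only [pvReCont, Bool.or_eq_true, decide_eq_true_iff, beq_iff_eq, hc, or_false] at h1
    simp only [pvReStart, Bool.or_eq_true, decide_eq_true_iff, beq_iff_eq, hc, or_false]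
    omega

lemma pvReStar_nonneg (r : List Char) : 0 ≤ pvReStar r := by
  induction r with
  | nil => simp [pvReStar]
  | cons c r ih => simp only [pvReStar]; split <;> omega

lemma pv_aloop_done (l : List Char) (pos : Int) :
    ∀ (fuel : Nat) (i : Int), 0 ≤ i → l.length ≤ i.toNat → pvALoop l pos fuel i = i - pos := by
  intro fuel
  induction fuel with
  | zero => intro i _ _; rfl
  | succ f ih =>
    intro i h0 hlen
    have h : ¬ i < (l.length : Int) := by omega
    simp [pvALoop, h]

lemma pv_aloop_nonneg (l : List Char) (pos : Int) :
    ∀ (fuel : Nat) (i : Int), pos < i → 0 ≤ i → l.length ≤ i.toNat + fuel →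
      pvALoop l pos fuel i = (i - pos) + pvReStar (l.drop i.toNat) := by
  intro fuel
  induction fuel with
  | zero =>
    intro i h1 h2 h3
    have hd : l.drop i.toNat = [] := List.drop_eq_nil_of_le (by omega)
    simp [pvALoop, hd, pvReStar]
  | succ f ih =>
    intro i h1 h2 h3
    by_cases hlt : i < (l.length : Int)
    · have hin : i.toNat < l.length := by omega
      have hget : PySem.List.pyGet? l i = some l[i.toNat] := by
        rw [PySem.List.pyGet?_of_nonneg l h2, List.getElem?_eq_getElem hin]
      have hdrop : l.drop i.toNat = l[i.toNat] :: l.drop (i.toNat + 1) :=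
        List.drop_eq_getElem_cons hin
      have htn : (i + 1).toNat = i.toNat + 1 := by omega
      simp only [pvALoop, if_pos hlt, hget]
      by_cases hc : pvReCont l[i.toNat] = true
      · rw [if_neg (fun h => by rw [(pv_break_rest _ pos i (by omega)).mp h] at hc; simp at hc)]
        rw [ih (i + 1) (by omega) (by omega) (by omega), htn, hdrop]
        simp only [pvReStar, if_pos hc]
        ring
      · rw [if_pos ((pv_break_rest _ pos i (by omega)).mpr (by simpa using hc))]
        rw [hdrop]
        simp only [pvReStar, if_neg hc]
        ring
    · have hd : l.drop i.toNat = [] := List.drop_eq_nil_of_le (by omega)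
      simp [pvALoop, hlt, hd, pvReStar]

lemma pv_pyget_neg (l : List Char) (i : Int) (h1 : -(l.length : Int) ≤ i) (h2 : i < 0)
    (hm : ((l.length : Int) + i).toNat < l.length) :
    PySem.List.pyGet? l i = some l[((l.length : Int) + i).toNat] := by
  have hi : PySem.List.pyGet? l i = PySem.List.pyGet? l (-(((-i).toNat : Nat) : Int)) := by
    congr 1; omega
  rw [hi, PySem.List.pyGet?_neg_natCast l _ (by omega) (by omega)]
  have he : l.length - (-i).toNat = ((l.length : Int) + i).toNat := by omega
  rw [he, List.getElem?_eq_getElem hm]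

def pvNegScanR (l : List Char) : List Char → Int
  | [] => pvReStar l
  | c :: r => if pvReCont c then 1 + pvNegScanR l r else 0

lemma pv_negScanR_eq (l : List Char) :
    ∀ r, pvNegScanR l r = pvReStar r + (if r.all pvReCont = true then pvReStar l else 0) := by
  intro r
  induction r with
  | nil => simp [pvNegScanR, pvReStar]
  | cons c r ih =>
    by_cases hc : pvReCont c = true
    · simp only [pvNegScanR, pvReStar, ih, List.all_cons, hc, Bool.true_and, if_true]
      ring
    · simp [pvNegScanR, pvReStar, hc]

lemma pv_aloop_negR (l : List Char) (pos : Int) (hp : pos < 0) (hl : -(l.length : Int) ≤ pos) :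
    ∀ (fuel : Nat) (i : Int), pos < i → i ≤ 0 → l.length + (-i).toNat ≤ fuel →
      pvALoop l pos fuel i = (i - pos) + pvNegScanR l (l.drop ((l.length : Int) + i).toNat) := by
  intro fuel
  induction fuel with
  | zero => intro i h1 h2 h3; exfalso; omega
  | succ f ih =>
    intro i h1 h2 h3
    rcases lt_or_eq_of_le h2 with hneg | h0
    · have hm : ((l.length : Int) + i).toNat < l.length := by omega
      have hget := pv_pyget_neg l i (by omega) hneg hm
      have hdrop : l.drop (((l.length : Int) + i).toNat) =
          l[((l.length : Int) + i).toNat] :: l.drop ((((l.length : Int) + i).toNat) + 1) :=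
        List.drop_eq_getElem_cons hm
      have hlt : i < (l.length : Int) := by omega
      have htn : ((l.length : Int) + (i + 1)).toNat = ((l.length : Int) + i).toNat + 1 := by omega
      simp only [pvALoop, if_pos hlt, hget]
      by_cases hc : pvReCont l[((l.length : Int) + i).toNat] = true
      · rw [if_neg (fun h => by rw [(pv_break_rest _ pos i (by omega)).mp h] at hc; simp at hc)]
        rw [ih (i + 1) (by omega) (by omega) (by omega), htn, hdrop]
        simp only [pvNegScanR, if_pos hc]
        ring
      · rw [if_pos ((pv_break_rest _ pos i (by omega)).mpr (by simpa using hc))]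
        rw [hdrop]
        simp only [pvNegScanR, if_neg hc]
        ring
    · subst h0
      have hz : ((l.length : Int) + 0).toNat = l.length := by omega
      rw [hz, List.drop_length]
      rw [pv_aloop_nonneg l pos (f + 1) 0 h1 le_rfl (by omega)]
      simp [pvNegScanR]

lemma pv_alt_nonneg_nil (s : String) (pos : Int) (h : 0 ≤ pos)
    (hd : s.toList.drop pos.toNat = []) : get_identifier_len_alt s pos = 0 := by
  unfold get_identifier_len_alt
  rw [PySem.List.slice_from s.toList h, hd]
  rfl

lemma pv_alt_nonneg_cons (s : String) (pos : Int) (h : 0 ≤ pos) (c : Char) (r : List Char)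
    (hd : s.toList.drop pos.toNat = c :: r) :
    get_identifier_len_alt s pos = if pvReStart c then 1 + pvReStar r else 0 := by
  unfold get_identifier_len_alt
  rw [PySem.List.slice_from s.toList h, hd]
  by_cases hs : pvReStart c = true <;> simp [pvReMatch?, hs]

lemma pv_alt_neg_cons (s : String) (pos : Int) (h1 : -(s.toList.length : Int) ≤ pos)
    (h2 : pos < 0) (c : Char) (r : List Char)
    (ht : s.toList.drop (((s.toList.length : Int) + pos).toNat) = c :: r) :
    get_identifier_len_alt s pos = if pvReStart c then 1 + pvReStar r else 0 := by
  unfold get_identifier_len_alt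
  have hsl : PySem.List.slice s.toList (some pos) none =
      PySem.List.slice s.toList (some (-(((-pos).toNat : Nat) : Int))) none := by
    congr 2; omega
  rw [hsl, PySem.List.slice_from_neg_natCast s.toList _ (by omega)]
  have he : s.toList.length - (-pos).toNat = ((s.toList.length : Int) + pos).toNat := by omega
  rw [he, ht]
  by_cases hs : pvReStart c = true <;> simp [pvReMatch?, hs]

-- A's value on the negative in-range phase, expressed through the tail s[len+pos:]
lemma pv_a_neg (s : String) (pos : Int) (h1 : -(s.toList.length : Int) ≤ pos) (h2 : pos < 0)
    (c : Char) (r : List Char)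
    (ht : s.toList.drop (((s.toList.length : Int) + pos).toNat) = c :: r) :
    get_identifier_len s pos =
      if pvReStart c then
        1 + pvReStar r + (if r.all pvReCont = true then pvReStar s.toList else 0)
      else 0 := by
  unfold get_identifier_len
  set l := s.toList with hls
  have hm : ((l.length : Int) + pos).toNat < l.length := by
    by_contra hcon
    rw [List.drop_eq_nil_of_le (by omega)] at ht
    simp at ht
  have hget := pv_pyget_neg l pos (by omega) h2 hm
  have hc : l[((l.length : Int) + pos).toNat] = c := by
    have := List.drop_eq_getElem_cons hm
    rw [ht] at this
    exact (List.cons.injEq _ _ _ _ ▸ this).1.symm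
  rw [hc] at hget
  have hfuel : ((l.length : Int) - pos).toNat = (((l.length : Int) - pos).toNat - 1) + 1 := by omega
  rw [hfuel]
  have hlt : pos < (l.length : Int) := by omega
  simp only [pvALoop, if_pos hlt, hget]
  by_cases hs : pvReStart c = true
  · rw [if_neg (fun h => by rw [(pv_break_first' c).mp h] at hs; simp at hs)]
    rw [pv_aloop_negR l pos h2 (by omega) _ (pos + 1) (by omega) (by omega) (by omega)]
    have htn : ((l.length : Int) + (pos + 1)).toNat = ((l.length : Int) + pos).toNat + 1 := by omega
    rw [htn]
    have hr : l.drop (((l.length : Int) + pos).toNat + 1) = r := by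
      have := List.drop_eq_getElem_cons hm
      rw [ht, hc] at this
      exact (List.cons.injEq _ _ _ _ ▸ this).2.symm
    rw [hr, pv_negScanR_eq, if_pos hs]
    ring
  · rw [if_pos ((pv_break_first' c).mpr (by simpa using hs)), if_neg hs]
    ring

-- ===== VERDICT (by name: the statement is the Claim_ definition above) =====
theorem get_identifier_len_spec : Claim_unchanged_get_identifier_len := by
  intro s pos _ hpre hnd
  by_cases hp : 0 ≤ pos
  · -- nonnegative pos: both scan s from pos
    rcases hd : s.toList.drop pos.toNat with _ | ⟨c, r⟩
    · have hge : s.toList.length ≤ pos.toNat := by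
        have := congrArg List.length hd
        simp only [List.length_drop, List.length_nil] at this
        omega
      rw [pv_alt_nonneg_nil s pos hp hd]
      unfold get_identifier_len
      rw [pv_aloop_done s.toList pos _ pos hp hge]
      simp
    · have hm : pos.toNat < s.toList.length := by
        have := congrArg List.length hd
        simp only [List.length_drop, List.length_cons] at this
        omega
      rw [pv_alt_nonneg_cons s pos hp c r hd]
      unfold get_identifier_len
      set l := s.toList with hls
      have hget : PySem.List.pyGet? l pos = some c := by
        rw [PySem.List.pyGet?_of_nonneg l hp, List.getElem?_eq_getElem hm]
        have := List.drop_eq_getElem_cons hm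
        rw [hd] at this
        exact congrArg some (List.cons.injEq _ _ _ _ ▸ this).1.symm
      have hfuel : ((l.length : Int) - pos).toNat = (((l.length : Int) - pos).toNat - 1) + 1 := by
        omega
      rw [hfuel]
      have hlt : pos < (l.length : Int) := by omega
      simp only [pvALoop, if_pos hlt, hget]
      by_cases hs : pvReStart c = true
      · rw [if_neg (fun h => by rw [(pv_break_first' c).mp h] at hs; simp at hs)]
        rw [pv_aloop_nonneg l pos _ (pos + 1) (by omega) (by omega) (by omega)]
        have htn : (pos + 1).toNat = pos.toNat + 1 := by omega
        have hr : l.drop (pos.toNat + 1) = r := by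
          have := List.drop_eq_getElem_cons hm
          rw [hd] at this
          exact (List.cons.injEq _ _ _ _ ▸ this).2.symm
        rw [htn, hr, if_pos hs]
        ring
      · rw [if_pos ((pv_break_first' c).mpr (by simpa using hs)), if_neg hs]
        ring
  · -- negative in-range pos
    have h2 : pos < 0 := by omega
    have h1 : -(s.toList.length : Int) ≤ pos := hpre
    rcases ht : s.toList.drop (((s.toList.length : Int) + pos).toNat) with _ | ⟨c, r⟩
    · exfalso
      have := congrArg List.length ht
      simp only [List.length_drop, List.length_nil] at this
      omega
    · rw [pv_a_neg s pos h1 h2 c r ht, pv_alt_neg_cons s pos h1 h2 c r ht]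
      by_cases hs : pvReStart c = true
      · rw [if_pos hs, if_pos hs]
        have hnd' : ¬ (r.all pvReCont = true ∧ s.toList.head?.all pvReCont = true) := by
          intro hx
          refine hnd ⟨h2, ?_⟩
          have hidx : s.toList.length - (-pos).toNat = ((s.toList.length : Int) + pos).toNat := by
            omega
          show ((s.toList.drop (s.toList.length - (-pos).toNat)).all pvDCont &&
            (s.toList.drop (s.toList.length - (-pos).toNat)).head?.all (!·.isDigit) &&
            s.toList.head?.all pvDCont) = true
          rw [hidx, ht]
          simp only [List.all_cons, List.head?_cons, Option.all_some, Bool.and_eq_true,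
            Bool.not_eq_true', pvDCont_eq]
          exact ⟨⟨⟨pv_cont_of_start c hs, hx.1⟩, pv_not_digit_of_start c hs⟩, hx.2⟩
        by_cases hall : r.all pvReCont = true
        · have hch : s.toList.head?.all pvReCont = false := by
            rcases hx : s.toList.head?.all pvReCont with _ | _
            · rfl
            · exact absurd ⟨hall, hx⟩ hnd'
          have hcount : pvReStar s.toList = 0 := by
            rcases hl0 : s.toList with _ | ⟨c0, l0⟩
            · simp [pvReStar]
            · rw [hl0] at hch
              simp only [List.head?_cons, Option.all_some] at hch
              simp [pvReStar, hch]
          rw [if_pos hall, hcount]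
          ring
        · rw [if_neg hall]
          ring
      · rw [if_neg hs, if_neg hs]

theorem get_identifier_len_changed : Claim_changed_get_identifier_len := by
  unfold Claim_changed_get_identifier_len; decide

theorem get_identifier_len_tight : Claim_exact_get_identifier_len := by
  intro s pos _ hpre hD
  obtain ⟨h2, hbool⟩ := hD
  have h1 : -(s.toList.length : Int) ≤ pos := hpre
  have hidx : s.toList.length - (-pos).toNat = ((s.toList.length : Int) + pos).toNat := by omega
  rw [hidx] at hbool
  rcases ht : s.toList.drop (((s.toList.length : Int) + pos).toNat) with _ | ⟨c, r⟩
  · exfalso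
    have := congrArg List.length ht
    simp only [List.length_drop, List.length_nil] at this
    omega
  · rw [ht] at hbool
    simp only [List.all_cons, List.head?_cons, Option.all_some, Bool.and_eq_true,
      Bool.not_eq_true', pvDCont_eq] at hbool
    obtain ⟨⟨⟨hcc, hall⟩, hdig⟩, hch⟩ := hbool
    have hs : pvReStart c = true := pv_start_of c hcc hdig
    rw [pv_a_neg s pos h1 h2 c r ht, pv_alt_neg_cons s pos h1 h2 c r ht]
    rw [if_pos hs, if_pos hs, if_pos hall]
    have hpos : 1 ≤ pvReStar s.toList := by
      rcases hl0 : s.toList with _ | ⟨c0, l0⟩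
      · exfalso
        have := congrArg List.length hl0
        simp only [List.length_nil] at this
        omega
      · rw [hl0] at hch
        simp only [List.head?_cons, Option.all_some] at hch
        have := pvReStar_nonneg l0
        simp only [pvReStar, if_pos hch]
        omega
    intro heq
    omega
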